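-- pv_equiv track=rewrite | github.com/BCM-Neurosurgery/av-brainvision-sync-pipeline | third_party/video_sync_nbu_main/scripts/analysis/serial_analysis.py | longest_ok_span
-- ===== SOURCE A (Python) =====
-- from typing import Dict, List, Optional, Sequence, Tuple
--
-- def longest_ok_span(ids: Sequence[int], expect_step: int) -> Tuple[Optional[int], int]:
--     """Return (start_index, length_in_steps) of the longest consecutive OK segment."""
--     best_start: Optional[int] = None
--     best_len = 0
--     cur_start: Optional[int] = None
--     cur_len = 0
--
--     for i in range(len(ids) - 1):
--         if ids[i + 1] - ids[i] == expect_step: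
--             if cur_len == 0:
--                 cur_start = i
--             cur_len += 1
--             if cur_len > best_len:
--                 best_len = cur_len
--                 best_start = cur_start
--         else:
--             cur_len = 0
--             cur_start = None
--
--     return best_start, best_len
-- ===== SOURCE B (Python) =====
-- from typing import Optional, Sequence, Tuple
--
--
-- def _groups(seq):
--     """Run-length encode seq into maximal (value, run_length) pairs, front to back."""
--     out = []
--     i = 0
--     while i < len(seq):
--         j = i + 1
--         while j < len(seq) and seq[j] == seq[i]:
--             j += 1
--         out.append((seq[i], j - i))
--         i = j
--     return out
--
--
-- def longest_ok_span(ids: Sequence[int], expect_step: int) -> Tuple[Optional[int], int]: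
--     """Return (start_index, length_in_steps) of the longest consecutive OK segment."""
--     ok = [ids[i + 1] - ids[i] == expect_step for i in range(len(ids) - 1)]
--     best_start: Optional[int] = None
--     best_len = 0
--     pos = 0
--     for val, run in _groups(ok):
--         if val and run > best_len:
--             best_start, best_len = pos, run
--         pos += run
--     return best_start, best_len
-- ===== Notes on version B (the rewrite author's own statement) =====
-- stated objective: alternative
-- what changed: Instead of tracking a current-run counter and start inside one stateful scan, B first materializes the step-OK indicator list, run-length encodes it into maximal (value, length) groups, and then picks the first longest True group by folding over the groups with a running offset.
import Mathlib
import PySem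

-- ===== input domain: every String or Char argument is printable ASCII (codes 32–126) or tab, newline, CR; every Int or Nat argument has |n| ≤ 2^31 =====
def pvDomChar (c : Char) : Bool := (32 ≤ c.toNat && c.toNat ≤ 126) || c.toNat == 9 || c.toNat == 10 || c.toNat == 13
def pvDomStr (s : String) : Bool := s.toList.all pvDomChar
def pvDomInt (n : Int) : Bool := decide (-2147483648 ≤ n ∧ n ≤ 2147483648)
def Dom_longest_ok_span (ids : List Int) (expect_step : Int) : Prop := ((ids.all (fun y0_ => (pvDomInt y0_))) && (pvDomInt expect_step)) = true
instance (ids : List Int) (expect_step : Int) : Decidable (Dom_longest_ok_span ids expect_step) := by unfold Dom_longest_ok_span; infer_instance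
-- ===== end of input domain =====

-- B replaces A's stateful current-run bookkeeping by a two-pass decomposition: build the
-- step-OK indicator list, run-length encode it, then pick the first longest True run
-- (objective: alternative decomposition, same O(n) cost).

-- ===== PORT A =====
-- Loop indices come from range(len(ids)-1), so ids[i] / ids[i+1] are always in range and
-- pyGetD's default 0 is never used (exact port of the always-succeeding Python indexing).
-- State (best_start, best_len, cur_start, cur_len); the loop body is the named helper below.
def longest_ok_span_step (ids : List Int) (expect_step : Int)
    (s : Option Int × Int × Option Int × Int) (i : Int) :
    Option Int × Int × Option Int × Int :=
  if PySem.List.pyGetD ids (i + 1) 0 - PySem.List.pyGetD ids i 0 == expect_step then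
    let cs := if s.2.2.2 == 0 then some i else s.2.2.1
    let cl := s.2.2.2 + 1
    if cl > s.2.1 then (cs, cl, cs, cl) else (s.1, s.2.1, cs, cl)
  else (s.1, s.2.1, (none : Option Int), (0 : Int))

def longest_ok_span (ids : List Int) (expect_step : Int) : Option Int × Int :=
  let fin := (PySem.List.pyRange 0 ((ids.length : Int) - 1) 1).foldl
    (longest_ok_span_step ids expect_step) (none, 0, none, 0)
  (fin.1, fin.2.1)

-- ===== PORT B =====
-- _groups: the outer while-loop over the start index i; the inner while-loop advancing j
-- over equal elements is ported as the length of the matching takeWhile prefix.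
def pvGroupsAux (seq : List Bool) (i : Nat) : List (Bool × Int) :=
  if h : i < seq.length then
    let j := i + 1 + ((seq.drop (i + 1)).takeWhile (fun x => x == seq[i])).length
    (seq[i], (j : Int) - (i : Int)) :: pvGroupsAux seq j
  else []
termination_by seq.length - i
decreasing_by omega

-- loop body for the groups pass: state (best_start, best_len, pos)
def longest_ok_span_alt_step (s : Option Int × Int × Int) (g : Bool × Int) :
    Option Int × Int × Int :=
  if g.1 && decide (g.2 > s.2.1) then (some s.2.2, g.2, s.2.2 + g.2)
  else (s.1, s.2.1, s.2.2 + g.2)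

def longest_ok_span_alt (ids : List Int) (expect_step : Int) : Option Int × Int :=
  let ok := (PySem.List.pyRange 0 ((ids.length : Int) - 1) 1).map
    (fun i => PySem.List.pyGetD ids (i + 1) 0 - PySem.List.pyGetD ids i 0 == expect_step)
  let fin := (pvGroupsAux ok 0).foldl longest_ok_span_alt_step (none, 0, 0)
  (fin.1, fin.2.1)

-- ===== PRECONDITION & SPEC =====
def Spec_longest_ok_span (ids : List Int) (expect_step : Int) (out : Option Int × Int) : Prop := out = longest_ok_span_alt ids expect_step
instance (ids : List Int) (expect_step : Int) (out : Option Int × Int) : Decidable (Spec_longest_ok_span ids expect_step out) := by unfold Spec_longest_ok_span; infer_instance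

-- ===== CLAIM (what is proved, stated in full; the proofs are below) =====
def Claim_equal_longest_ok_span : Prop := ∀ (ids : List Int) (expect_step : Int), Dom_longest_ok_span ids expect_step → Spec_longest_ok_span ids expect_step (longest_ok_span ids expect_step)

-- ===== LEMMAS AND PROOFS =====

-- A's loop body as a step over (index, ok-flag) pairs.
def pvStepA (s : Option Int × Int × Option Int × Int) (p : Int × Bool) :
    Option Int × Int × Option Int × Int :=
  if p.2 then
    let cs := if s.2.2.2 == 0 then some p.1 else s.2.2.1
    let cl := s.2.2.2 + 1
    if cl > s.2.1 then (cs, cl, cs, cl) else (s.1, s.2.1, cs, cl)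
  else (s.1, s.2.1, (none : Option Int), (0 : Int))

-- B's loop body over (value, run-length) groups.
def pvStepB (s : Option Int × Int × Int) (g : Bool × Int) : Option Int × Int × Int :=
  if g.1 && decide (g.2 > s.2.1) then (some s.2.2, g.2, s.2.2 + g.2)
  else (s.1, s.2.1, s.2.2 + g.2)

-- flags paired with their (integer) positions, starting at p
def pvEnum : Int → List Bool → List (Int × Bool)
  | _, [] => []
  | p, b :: bs => (p, b) :: pvEnum (p + 1) bs

-- structural run-length encoding (proof-side reformulation of pvGroupsAux)
def pvGroups : List Bool → List (Bool × Int)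
  | [] => []
  | v :: rest =>
      (v, 1 + ((rest.takeWhile (fun x => x == v)).length : Int)) ::
        pvGroups (rest.dropWhile (fun x => x == v))
termination_by l => l.length
decreasing_by
  simp only [List.length_cons]
  exact Nat.lt_succ_of_le (List.length_dropWhile_le _ _)

def pvConsec (p : Int) (m : Nat) : List Int := (List.range m).map (fun (k : Nat) => p + (k : Int))

theorem pv_dropWhile_eq_drop {α : Type} (p : α → Bool) (l : List α) :
    l.dropWhile p = l.drop (l.takeWhile p).length := by
  induction l with
  | nil => simp
  | cons x xs ih =>
      by_cases h : p x <;> simp [List.dropWhile_cons, List.takeWhile_cons, h, ih]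

theorem pv_dropWhile_head {α : Type} (p : α → Bool) (l : List α) (x : α) (xs : List α)
    (h : l.dropWhile p = x :: xs) : p x = false := by
  induction l with
  | nil => simp at h
  | cons y ys ih =>
      by_cases hy : p y
      · exact ih (by simpa [List.dropWhile_cons, hy] using h)
      · simp [List.dropWhile_cons, hy] at h
        simpa [h.1] using (Bool.eq_false_iff.mpr (by simp [h.1] at hy ⊢; exact hy))

theorem pvGroupsAux_eq (seq : List Bool) (i : Nat) :
    pvGroupsAux seq i = pvGroups (seq.drop i) := by
  by_cases h : i < seq.length
  · rw [pvGroupsAux]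
    simp only [h, dif_pos]
    have hdrop : seq.drop i = seq[i] :: seq.drop (i + 1) := List.drop_eq_getElem_cons h
    rw [hdrop, pvGroups]
    have htail := pvGroupsAux_eq seq (i + 1 + ((seq.drop (i + 1)).takeWhile (fun x => x == seq[i])).length)
    rw [htail, pv_dropWhile_eq_drop, List.drop_drop]
    congr 2
    all_goals first | omega | (push_cast; ring)
  · rw [pvGroupsAux]
    simp only [h, dif_neg, not_false_iff]
    rw [List.drop_eq_nil_of_le (by omega), pvGroups]
termination_by seq.length - i
decreasing_by omega

theorem pvConsec_succ (p : Int) (m : Nat) : pvConsec p (m + 1) = p :: pvConsec (p + 1) m := by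
  apply List.ext_getElem
  · simp [pvConsec]
  · intro n h1 h2
    cases n with
    | zero =>
        simp only [pvConsec, List.getElem_map, List.getElem_range, List.getElem_cons_zero]
        simp
    | succ k =>
        simp only [pvConsec, List.getElem_map, List.getElem_range, List.getElem_cons_succ]
        push_cast
        ring

theorem pvRange_eq_consec (p : Int) (m : Nat) :
    PySem.List.pyRange p (p + (m : Int)) 1 = pvConsec p m := by
  rw [PySem.List.pyRange_one]
  have h : ((p + (m : Int)) - p).toNat = m := by omega
  rw [h]
  simp only [pvConsec]

theorem pvEnum_map (m : Nat) (p : Int) (f : Int → Bool) :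
    (pvConsec p m).map (fun i => (i, f i)) = pvEnum p ((pvConsec p m).map f) := by
  induction m generalizing p with
  | zero => simp [pvConsec, pvEnum]
  | succ n ih => rw [pvConsec_succ]; simp only [List.map_cons, pvEnum]; rw [ih]

theorem pvEnum_append (p : Int) (a b : List Bool) :
    pvEnum p (a ++ b) = pvEnum p a ++ pvEnum (p + (a.length : Int)) b := by
  induction a generalizing p with
  | nil => simp [pvEnum]
  | cons x xs ih =>
      simp only [List.cons_append, pvEnum, List.length_cons, ih]
      congr 2
      push_cast
      ring

theorem pvRunTrue (k : Nat) (p s : Int) (bs : Option Int) (bl c : Int)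
    (h1 : 1 ≤ c) (h2 : c ≤ bl) :
    (pvEnum p (List.replicate k true)).foldl pvStepA (bs, bl, some s, c)
      = ((if c + (k : Int) > bl then some s else bs), max bl (c + (k : Int)), some s, c + (k : Int)) := by
  induction k generalizing p bs bl c with
  | zero =>
      simp only [List.replicate, pvEnum, List.foldl_nil, Nat.cast_zero, add_zero]
      rw [if_neg (by omega), max_eq_left h2]
  | succ n ih =>
      rw [List.replicate_succ]
      simp only [pvEnum, List.foldl_cons]
      have hc0 : (c == 0) = false := by simp; omega
      have hstep : pvStepA (bs, bl, some s, c) (p, true)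
          = if c + 1 > bl then (some s, c + 1, some s, c + 1) else (bs, bl, some s, c + 1) := by
        simp [pvStepA, hc0]
      rw [hstep]
      by_cases hc : c + 1 > bl
      · rw [if_pos hc, ih (p + 1) (some s) (c + 1) (c + 1) (by omega) (le_refl _)]
        have hcond : c + (((n : Nat) + 1 : Nat) : Int) > bl := by push_cast; omega
        have hmax : max (c + 1) (c + 1 + (n : Int)) = max bl (c + (((n : Nat) + 1 : Nat) : Int)) := by
          push_cast; omega
        rw [if_pos hcond, ite_self, hmax]
        simp only [Prod.mk.injEq, true_and, and_true]
        push_cast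
        ring
      · rw [if_neg hc, ih (p + 1) bs bl (c + 1) (by omega) (by omega)]
        have he : c + 1 + (n : Int) = c + (((n : Nat) + 1 : Nat) : Int) := by push_cast; ring
        rw [he]

theorem pvRunTrue0 (k : Nat) (p : Int) (bs : Option Int) (bl : Int)
    (h1 : 1 ≤ k) (h2 : 0 ≤ bl) :
    (pvEnum p (List.replicate k true)).foldl pvStepA (bs, bl, none, 0)
      = ((if (k : Int) > bl then some p else bs), max bl (k : Int), some p, (k : Int)) := by
  cases k with
  | zero => omega
  | succ n =>
      rw [List.replicate_succ]
      simp only [pvEnum, List.foldl_cons]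
      have hstep : pvStepA (bs, bl, none, 0) (p, true)
          = if (1 : Int) > bl then (some p, 1, some p, 1) else (bs, bl, some p, 1) := by
        simp [pvStepA]
      rw [hstep]
      by_cases hb : (1 : Int) > bl
      · rw [if_pos hb, pvRunTrue n (p + 1) p (some p) 1 1 (le_refl _) (le_refl _)]
        have hcond : ((((n : Nat) + 1 : Nat)) : Int) > bl := by push_cast; omega
        have hmax : max (1 : Int) (1 + (n : Int)) = max bl ((((n : Nat) + 1 : Nat)) : Int) := by
          push_cast; omega
        rw [if_pos hcond, ite_self, hmax]
        simp only [Prod.mk.injEq, true_and, and_true]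
        push_cast
        ring
      · rw [if_neg hb, pvRunTrue n (p + 1) p bs bl 1 (le_refl _) (by omega)]
        have he : (1 : Int) + (n : Int) = ((((n : Nat) + 1 : Nat)) : Int) := by push_cast; ring
        rw [he]

theorem pvPeelFalse (xs : List Bool) (bs : Option Int) (bl p : Int) :
    (pvGroups (false :: xs)).foldl pvStepB (bs, bl, p)
      = (pvGroups xs).foldl pvStepB (bs, bl, p + 1) := by
  cases xs with
  | nil => simp [pvGroups, pvStepB]
  | cons y ys =>
      cases y with
      | false =>
          rw [show pvGroups (false :: false :: ys)
                = (false, 1 + (((false :: ys).takeWhile (fun x => x == false)).length : Int)) ::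
                    pvGroups ((false :: ys).dropWhile (fun x => x == false)) from by rw [pvGroups]]
          rw [show pvGroups (false :: ys)
                = (false, 1 + ((ys.takeWhile (fun x => x == false)).length : Int)) ::
                    pvGroups (ys.dropWhile (fun x => x == false)) from by rw [pvGroups]]
          simp only [List.takeWhile_cons, List.dropWhile_cons, List.foldl_cons]
          simp [pvStepB]
          congr 2
          ring
      | true =>
          rw [show pvGroups (false :: true :: ys)
                = (false, 1 + (((true :: ys).takeWhile (fun x => x == false)).length : Int)) ::
                    pvGroups ((true :: ys).dropWhile (fun x => x == false)) from by rw [pvGroups]]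
          simp only [List.takeWhile_cons, List.dropWhile_cons, List.foldl_cons]
          simp [pvStepB]

theorem pvMain (N : Nat) : ∀ (l : List Bool), l.length ≤ N → ∀ (p : Int) (bs : Option Int) (bl : Int), 0 ≤ bl →
    (((pvEnum p l).foldl pvStepA (bs, bl, none, 0)).1,
      ((pvEnum p l).foldl pvStepA (bs, bl, none, 0)).2.1)
    = (((pvGroups l).foldl pvStepB (bs, bl, p)).1,
        ((pvGroups l).foldl pvStepB (bs, bl, p)).2.1) := by
  induction N with
  | zero =>
      intro l hl p bs bl hbl
      have hnil : l = [] := List.eq_nil_of_length_eq_zero (by omega)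
      subst hnil
      simp [pvEnum, pvGroups]
  | succ N ih =>
      intro l hl p bs bl hbl
      cases l with
      | nil => simp [pvEnum, pvGroups]
      | cons b xs =>
          cases b with
          | false =>
              simp only [pvEnum, List.foldl_cons]
              have hstep : pvStepA (bs, bl, none, 0) (p, false) = (bs, bl, none, 0) := by
                simp [pvStepA]
              rw [hstep, pvPeelFalse]
              exact ih xs (by simpa using hl) (p + 1) bs bl hbl
          | true =>
              have htw_rep : xs.takeWhile (fun x => x == true)
                  = List.replicate (xs.takeWhile (fun x => x == true)).length true := by
                apply List.eq_replicate_of_mem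
                intro b hb
                have := List.mem_takeWhile_imp hb
                simpa using this
              have hsplit : true :: xs
                  = List.replicate ((xs.takeWhile (fun x => x == true)).length + 1) true
                      ++ xs.dropWhile (fun x => x == true) := by
                rw [List.replicate_succ]
                conv_lhs => rw [show xs = xs.takeWhile (fun x => x == true)
                  ++ xs.dropWhile (fun x => x == true) from (List.takeWhile_append_dropWhile).symm]
                rw [← htw_rep]
                simp
              rw [show pvGroups (true :: xs)
                    = (true, 1 + ((xs.takeWhile (fun x => x == true)).length : Int)) ::
                        pvGroups (xs.dropWhile (fun x => x == true)) from by rw [pvGroups]]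
              simp only [List.foldl_cons]
              rw [hsplit, pvEnum_append, List.foldl_append,
                pvRunTrue0 ((xs.takeWhile (fun x => x == true)).length + 1) p bs bl (by omega) hbl]
              have hstepB : pvStepB (bs, bl, p) (true, 1 + ((xs.takeWhile (fun x => x == true)).length : Int))
                  = ((if (((xs.takeWhile (fun x => x == true)).length + 1 : Nat) : Int) > bl
                        then some p else bs),
                      max bl (((xs.takeWhile (fun x => x == true)).length + 1 : Nat) : Int),
                      p + (1 + ((xs.takeWhile (fun x => x == true)).length : Int))) := by
                by_cases hgt : 1 + ((xs.takeWhile (fun x => x == true)).length : Int) > bl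
                · rw [pvStepB, if_pos (by simpa using hgt)]
                  rw [if_pos (by push_cast; omega)]
                  simp only [Prod.mk.injEq, true_and, and_true]
                  push_cast; omega
                · rw [pvStepB, if_neg (by simpa using hgt)]
                  rw [if_neg (by push_cast; omega)]
                  simp only [Prod.mk.injEq, true_and, and_true]
                  push_cast; omega
              rw [hstepB]
              cases hdw : xs.dropWhile (fun x => x == true) with
              | nil => simp [pvEnum, pvGroups]
              | cons d ds =>
                  have hd : d = false := by
                    have := pv_dropWhile_head (fun x => x == true) xs d ds hdw
                    simpa using this
                  subst hd
                  simp only [pvEnum, List.foldl_cons]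
                  have hstep2 : ∀ (S1 : Option Int) (S2 : Int) (q : Int),
                      pvStepA (S1, S2, some p, (((xs.takeWhile (fun x => x == true)).length + 1 : Nat) : Int)) (q, false)
                        = (S1, S2, none, 0) := by
                    intro S1 S2 q
                    simp [pvStepA]
                  rw [hstep2, pvPeelFalse]
                  have hlen : ds.length ≤ N := by
                    have h1 : xs.length ≤ N := by simpa using hl
                    have h2 : (xs.dropWhile (fun x => x == true)).length ≤ xs.length :=
                      List.length_dropWhile_le _ _
                    rw [hdw] at h2
                    simp at h2
                    omega
                  have hmb : 0 ≤ max bl ((((xs.takeWhile (fun x => x == true)).length + 1 : Nat)) : Int) := by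
                    omega
                  have := ih ds hlen
                    (p + ((List.replicate ((xs.takeWhile (fun x => x == true)).length + 1) true).length : Int) + 1)
                    (if ((((xs.takeWhile (fun x => x == true)).length + 1 : Nat)) : Int) > bl then some p else bs)
                    (max bl ((((xs.takeWhile (fun x => x == true)).length + 1 : Nat)) : Int)) hmb
                  rw [this]
                  have harg : p + ((List.replicate ((xs.takeWhile (fun x => x == true)).length + 1) true).length : Int) + 1
                      = p + (1 + ((xs.takeWhile (fun x => x == true)).length : Int)) + 1 := by
                    simp
                    push_cast
                    ring
                  rw [harg]

-- ===== VERDICT (by name: the statement is the Claim_ definition above) =====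
theorem pvStepA_bridge (ids : List Int) (expect_step : Int) :
    longest_ok_span_step ids expect_step = fun s i =>
      pvStepA s (i, PySem.List.pyGetD ids (i + 1) 0 - PySem.List.pyGetD ids i 0 == expect_step) := rfl

theorem pvStepB_bridge : longest_ok_span_alt_step = pvStepB := rfl

-- bridge: both ports' folds over the shared indicator list
theorem pvBridge (ids : List Int) (expect_step : Int) :
    longest_ok_span ids expect_step = longest_ok_span_alt ids expect_step := by
  cases ids with
  | nil =>
      simp only [longest_ok_span, longest_ok_span_alt]
      rw [PySem.List.pyRange_one_eq_nil (by norm_num)]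
      simp only [List.map_nil, List.foldl_nil]
      rw [pvGroupsAux_eq, List.drop_zero, pvGroups, List.foldl_nil]
  | cons a as =>
      simp only [longest_ok_span, longest_ok_span_alt, pvStepA_bridge, pvStepB_bridge]
      have hlen : ((a :: as).length : Int) - 1 = 0 + (as.length : Int) := by
        simp
      rw [hlen, pvRange_eq_consec 0 as.length]
      rw [pvGroupsAux_eq, List.drop_zero]
      rw [← List.foldl_map (f := fun i => (i, PySem.List.pyGetD (a :: as) (i + 1) 0
            - PySem.List.pyGetD (a :: as) i 0 == expect_step)) (g := pvStepA)]
      rw [pvEnum_map as.length 0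
        (fun i => PySem.List.pyGetD (a :: as) (i + 1) 0 - PySem.List.pyGetD (a :: as) i 0 == expect_step)]
      exact pvMain ((pvConsec 0 as.length).map
          (fun i => PySem.List.pyGetD (a :: as) (i + 1) 0 - PySem.List.pyGetD (a :: as) i 0 == expect_step)).length
        _ (le_refl _) 0 none 0 (le_refl _)

theorem longest_ok_span_spec : Claim_equal_longest_ok_span := by
  intro ids expect_step _
  unfold Spec_longest_ok_span
  exact pvBridge ids expect_step
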